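-- pv_equiv track=rewrite | github.com/MarkDs519/Encode-Burrows-Wheeler-transform | invBWT.py | rankBwt
-- ===== SOURCE A (Python) =====
-- def rankBwt(bw):
--     '''
--      Given BWT string bw, returns a parallel list of B-ranks.
--      Time Complexity: O(N)
--     :param bw: the bwt
--     :return: ranks of the elements in bwt
--     '''
--     table = dict()      # creating an empty table
--     ranks = []
--     for item in bw:
--         if item not in table:
--             table[item] = 0       # set all ranks initially as 0
--         ranks.append(table[item])   # inserting all the ranks inside the table
--         table[item] += 1             # ranking all the items
--     return ranks, table
-- ===== SOURCE B (Python) =====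
-- def rankBwt(bw):
--     positions = {}
--     for i, item in enumerate(bw):
--         positions.setdefault(item, []).append(i)
--     ranks = [0] * len(bw)
--     table = {}
--     for item, ps in positions.items():
--         for r, i in enumerate(ps):
--             ranks[i] = r
--         table[item] = len(ps)
--     return ranks, table
-- ===== Notes on version B (the rewrite author's own statement) =====
-- stated objective: alternative
-- what changed: Replaces the single running-count pass with a two-phase decomposition: first build an inverted index of positions per character, then scatter each position list's enumerate ranks into a preallocated list and read totals off list lengths.
import Mathlib
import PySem

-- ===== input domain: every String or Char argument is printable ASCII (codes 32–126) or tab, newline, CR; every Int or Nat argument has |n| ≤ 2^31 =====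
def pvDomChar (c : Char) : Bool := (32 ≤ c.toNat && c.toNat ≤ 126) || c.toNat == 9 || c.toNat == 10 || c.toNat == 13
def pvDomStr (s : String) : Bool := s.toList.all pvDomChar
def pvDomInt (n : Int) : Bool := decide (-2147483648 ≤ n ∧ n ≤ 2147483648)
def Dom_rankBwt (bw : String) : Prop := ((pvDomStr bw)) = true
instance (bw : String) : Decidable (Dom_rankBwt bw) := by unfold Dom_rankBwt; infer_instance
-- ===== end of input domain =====

-- B replaces A's single running-count pass by a two-phase decomposition: build an inverted
-- index of positions per character, then scatter enumerate ranks into a preallocated list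
-- and read the per-character totals off the position-list lengths (same result, alternative algorithm).


-- ===== PORT A =====
-- iterating a Python string yields its characters as 1-character strings

def pvStr1 (c : Char) : String := String.ofList [c]

def rankBwt (bw : String) : List Int × (List (String × Int)) :=
  let st := (bw.toList.map pvStr1).foldl
    (fun (acc : PySem.Dict String Int × List Int) item =>
      let table := if acc.1.contains item then acc.1 else acc.1.insert item 0
      let ranks := acc.2 ++ [table.getD item 0]
      (table.insert item (table.getD item 0 + 1), ranks))
    (PySem.Dict.empty, [])
  (st.2, st.1.items)

-- ===== PORT B =====
def rankBwt_alt (bw : String) : List Int × (List (String × Int)) :=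
  let positions := (PySem.List.enumerate (bw.toList.map pvStr1) 0).foldl
      (fun (d : PySem.Dict String (List Int)) p => d.modify p.2 [] (· ++ [p.1]))
      PySem.Dict.empty
  let init : List Int := PySem.List.pyRepeat [(0 : Int)] (PySem.Str.len bw)
  let st := positions.items.foldl
    (fun (acc : List Int × PySem.Dict String Int) kv =>
      ((PySem.List.enumerate kv.2 0).foldl
          (fun rs ri => PySem.List.pySetD rs ri.2 ri.1) acc.1,
       acc.2.insert kv.1 (kv.2.length : Int)))
    (init, PySem.Dict.empty)
  (st.1, st.2.items)

-- ===== PRECONDITION & SPEC =====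
def Spec_rankBwt (bw : String) (out : List Int × (List (String × Int))) : Prop := out = rankBwt_alt bw
instance (bw : String) (out : List Int × (List (String × Int))) : Decidable (Spec_rankBwt bw out) := by unfold Spec_rankBwt; infer_instance

-- ===== CLAIM (what is proved, stated in full; the proofs are below) =====
def Claim_equal_rankBwt : Prop := ∀ (bw : String), Dom_rankBwt bw → Spec_rankBwt bw (rankBwt bw)

-- ===== LEMMAS AND PROOFS =====

-- the list of B-ranks A's loop appends, as a recursion over the characters
def ranksSpec (d : PySem.Dict String Int) : List String → List Int
  | [] => []
  | c :: t => d.getD c 0 :: ranksSpec (d.insert c (d.getD c 0 + 1)) t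

-- the list of positions at which c occurs in l, indices starting at s (B's positions[c])
def posOf (s : Int) (l : List String) (c : String) : List Int :=
  ((PySem.List.enumerate l s).filter (fun p => p.2 == c)).map (·.1)

-- B's inner scatter loop
def scat (r0 : Int) (ps : List Int) (rs : List Int) : List Int :=
  (PySem.List.enumerate ps r0).foldl (fun rs ri => PySem.List.pySetD rs ri.2 ri.1) rs

lemma foldA_eq (l : List String) (d : PySem.Dict String Int) (rs : List Int) :
    l.foldl (fun (acc : PySem.Dict String Int × List Int) item =>
      let table := if acc.1.contains item then acc.1 else acc.1.insert item 0
      let ranks := acc.2 ++ [table.getD item 0]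
      (table.insert item (table.getD item 0 + 1), ranks)) (d, rs)
    = (l.foldl (fun d x => d.insert x (d.getD x 0 + 1)) d, rs ++ ranksSpec d l) := by
  induction l generalizing d rs with
  | nil => simp [ranksSpec]
  | cons c t ih =>
    simp only [List.foldl_cons, ih, ranksSpec]
    simp only [List.cons_append, List.nil_append, List.append_assoc,
      Prod.mk.injEq]
    by_cases h : d.contains c = true
    · simp [h]
    · simp only [Bool.not_eq_true] at h
      simp [h, PySem.Dict.getD_insert_self, PySem.Dict.insert_insert_self,
        PySem.Dict.getD_of_not_contains d 0 h]

lemma ranksSpec_length (l : List String) (d : PySem.Dict String Int) :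
    (ranksSpec d l).length = l.length := by
  induction l generalizing d <;> simp [ranksSpec, *]

lemma ranksSpec_get (l : List String) (d : PySem.Dict String Int) (k : Nat) (hk : k < l.length) :
    (ranksSpec d l)[k]'(by rw [ranksSpec_length]; exact hk)
      = d.getD l[k] 0 + ((l.take k).count l[k] : Int) := by
  induction l generalizing d k with
  | nil => simp at hk
  | cons c t ih =>
    cases k with
    | zero => simp [ranksSpec]
    | succ k =>
      simp only [ranksSpec, List.getElem_cons_succ, List.take_succ_cons, List.count_cons]
      rw [ih (d.insert c (d.getD c 0 + 1)) k (by simpa using hk)]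
      rw [PySem.Dict.getD_insert]
      split <;> rename_i h
      · simp [h]
        ring
      · have hk' : k < t.length := by simpa using hk
        have h' : ¬ c = t[k] := fun e => h e.symm
        simp [h']

lemma posOf_cons (s : Int) (a : String) (t : List String) (c : String) :
    posOf s (a :: t) c = (if a = c then [s] else []) ++ posOf (s + 1) t c := by
  simp only [posOf, PySem.List.enumerate_cons, List.filter_cons]
  by_cases h : a = c <;> simp [h]

lemma mem_posOf (l : List String) (s : Int) (c : String) (v : Int) :
    v ∈ posOf s l c ↔ ∃ (j : Nat) (hj : j < l.length), v = s + j ∧ l[j] = c := by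
  simp only [posOf, List.mem_map, List.mem_filter, PySem.List.mem_enumerate_iff]
  constructor
  · rintro ⟨p, ⟨⟨j, hj, rfl⟩, h2⟩, rfl⟩
    exact ⟨j, hj, rfl, by simpa using h2⟩
  · rintro ⟨j, hj, rfl, hc⟩
    exact ⟨(s + j, l[j]), ⟨⟨j, hj, rfl⟩, by simpa using hc⟩, rfl⟩

lemma length_posOf (l : List String) (s : Int) (c : String) :
    (posOf s l c).length = l.count c := by
  induction l generalizing s with
  | nil => simp [posOf]
  | cons a t ih =>
    rw [posOf_cons]
    by_cases h : a = c <;> simp [h, ih]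

lemma posOf_pairwise (l : List String) (s : Int) (c : String) :
    (posOf s l c).Pairwise (· < ·) := by
  have h := PySem.List.pairwise_lt_enumerate l s
  exact (List.pairwise_map.mpr ((h.filter _).imp (fun hpq => hpq)))

lemma idxOf_posOf (l : List String) (s : Int) (c : String) (k : Nat) (hk : k < l.length)
    (hc : l[k] = c) : (posOf s l c).idxOf (s + k) = (l.take k).count c := by
  induction l generalizing s k with
  | nil => simp at hk
  | cons a t ih =>
    rw [posOf_cons]
    cases k with
    | zero =>
      subst hc
      simp [List.idxOf_cons_self]
    | succ k =>
      have hk' : k < t.length := by simpa using hk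
      have hc' : t[k] = c := by simpa using hc
      have harith : s + ((k + 1 : Nat) : Int) = (s + 1) + (k : Nat) := by push_cast; ring
      rw [List.take_succ_cons, List.count_cons]
      by_cases h : a = c
      · have hgt : s ≠ s + ((k + 1 : Nat) : Int) := by push_cast; omega
        rw [if_pos h, List.singleton_append, List.idxOf_cons_ne _ hgt, harith,
          ih (s + 1) k hk' hc']
        simp [h]
      · rw [if_neg h, List.nil_append, harith, ih (s + 1) k hk' hc']
        simp [h]

lemma scat_length (ps : List Int) (r0 : Int) (rs : List Int) :
    (scat r0 ps rs).length = rs.length := by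
  induction ps generalizing r0 rs with
  | nil => simp [scat]
  | cons x t ih =>
    simp only [scat, PySem.List.enumerate_cons, List.foldl_cons]
    rw [show (PySem.List.enumerate t (r0+1)).foldl (fun rs ri => PySem.List.pySetD rs ri.2 ri.1) (PySem.List.pySetD rs x r0) = scat (r0+1) t (PySem.List.pySetD rs x r0) from rfl]
    rw [ih, PySem.List.length_pySetD]

lemma scat_get (ps : List Int) (r0 : Int) (rs : List Int) (k : Nat) (hk : k < rs.length)
    (hnd : ps.Nodup) (hb : ∀ x ∈ ps, 0 ≤ x ∧ x.toNat < rs.length) :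
    (scat r0 ps rs)[k]'(by rw [scat_length]; exact hk)
      = if (k : Int) ∈ ps then r0 + (ps.idxOf (k : Int) : Int) else rs[k] := by
  induction ps generalizing r0 rs with
  | nil => simp [scat]
  | cons x t ih =>
    obtain ⟨hx0, hxl⟩ := hb x (List.mem_cons_self ..)
    have hset : PySem.List.pySetD rs x r0 = rs.set x.toNat r0 :=
      PySem.List.pySetD_of_nonneg rs r0 hx0
    have hstep : scat r0 (x :: t) rs = scat (r0 + 1) t (rs.set x.toNat r0) := by
      simp only [scat, PySem.List.enumerate_cons, List.foldl_cons, hset]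
    simp only [hstep]
    have hlen : (rs.set x.toNat r0).length = rs.length := by simp
    rw [ih (r0 + 1) (rs.set x.toNat r0) (by rw [hlen]; exact hk) hnd.of_cons
      (fun y hy => by rw [hlen]; exact hb y (List.mem_cons_of_mem _ hy))]
    by_cases hkt : (k : Int) ∈ t
    · have hxk : x ≠ (k : Int) :=
        fun e => (List.nodup_cons.mp hnd).1 (by rw [e]; exact hkt)
      rw [if_pos hkt, if_pos (List.mem_cons_of_mem _ hkt), List.idxOf_cons_ne _ hxk]
      push_cast
      ring
    · by_cases hxkeq : x = (k : Int)
      · have hxt : x.toNat = k := by omega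
        rw [if_neg hkt, if_pos (hxkeq ▸ List.mem_cons_self ..)]
        rw [List.getElem_set, if_pos hxt]
        subst hxkeq
        simp [List.idxOf_cons_self]
      · have hxt : x.toNat ≠ k := by omega
        have hne : ¬ ((k : Int) ∈ x :: t) := by
          simp only [List.mem_cons, not_or]
          exact ⟨fun e => hxkeq e.symm, hkt⟩
        rw [if_neg hkt, if_neg hne, List.getElem_set, if_neg hxt]

lemma mem_posOf_zero (ls : List String) (c : String) (k : Nat) (hk : k < ls.length) :
    (k : Int) ∈ posOf 0 ls c ↔ ls[k] = c := by
  rw [mem_posOf]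
  constructor
  · rintro ⟨j, hj, hkj, hc⟩
    have : j = k := by omega
    subst this; exact hc
  · intro hc
    exact ⟨k, hk, by omega, hc⟩

lemma posOf_nodup (ls : List String) (s : Int) (c : String) : (posOf s ls c).Nodup :=
  (posOf_pairwise ls s c).imp ne_of_lt

lemma scatFold_length (its : List (String × List Int)) (rs : List Int) :
    (its.foldl (fun (rs : List Int) kv => scat 0 kv.2 rs) rs).length = rs.length := by
  induction its generalizing rs with
  | nil => rfl
  | cons kv t ih => rw [List.foldl_cons, ih, scat_length]

lemma outer_get (ls : List String) (chars : List String) (rs : List Int)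
    (hlen : rs.length = ls.length) (k : Nat) (hk : k < ls.length) :
    ((chars.map (fun c => (c, posOf 0 ls c))).foldl
        (fun (rs : List Int) kv => scat 0 kv.2 rs) rs)[k]'(by
          rw [scatFold_length, hlen]; exact hk)
      = if ls[k] ∈ chars then ((ls.take k).count ls[k] : Int)
        else rs[k]'(by rw [hlen]; exact hk) := by
  induction chars generalizing rs with
  | nil => simp
  | cons c cs ih =>
    simp only [List.map_cons, List.foldl_cons]
    have hlen' : (scat 0 (posOf 0 ls c) rs).length = ls.length := by
      rw [scat_length]; exact hlen
    rw [ih (scat 0 (posOf 0 ls c) rs) hlen']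
    have hsg := scat_get (posOf 0 ls c) 0 rs k (by rw [hlen]; exact hk)
      (posOf_nodup ls 0 c)
      (fun x hx => by
        rw [mem_posOf] at hx
        obtain ⟨j, hj, rfl, _⟩ := hx
        constructor
        · omega
        · rw [hlen]; omega)
    by_cases hcs : ls[k] ∈ cs
    · simp [hcs]
    · rw [if_neg hcs, hsg]
      by_cases hmem : ls[k] = c
      · rw [if_pos ((mem_posOf_zero ls c k hk).mpr hmem),
          if_pos (by rw [hmem]; exact List.mem_cons_self ..)]
        have := idxOf_posOf ls 0 c k hk hmem
        rw [show (k : Int) = 0 + (k : Nat) by ring, this, hmem]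
        ring
      · rw [if_neg (fun h => hmem ((mem_posOf_zero ls c k hk).mp h)),
          if_neg (by simp [List.mem_cons, hmem, hcs])]

lemma rankBwt_eq (bw : String) :
    rankBwt bw = (ranksSpec PySem.Dict.empty (bw.toList.map pvStr1),
      (PySem.Dict.counter (bw.toList.map pvStr1)).items) := by
  unfold rankBwt
  rw [foldA_eq, PySem.Dict.foldl_insert_getD_add_one_eq_counter]
  simp

lemma positions_items (ls : List String) :
    ((PySem.List.enumerate ls 0).foldl
      (fun (d : PySem.Dict String (List Int)) p => d.modify p.2 [] (· ++ [p.1]))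
      PySem.Dict.empty).items
    = (PySem.Set.ofList ls).map (fun c => (c, posOf 0 ls c)) := by
  have hnd : ((PySem.List.enumerate ls 0).foldl
      (fun (d : PySem.Dict String (List Int)) p => d.modify p.2 [] (· ++ [p.1]))
      PySem.Dict.empty).keys.Nodup :=
    PySem.Dict.nodup_keys_foldl_modify_key (PySem.List.enumerate ls 0)
      (fun p : Int × String => p.2) []
      (fun _ (p : Int × String) (l : List Int) => l ++ [p.1]) PySem.Dict.empty
      (by simp [PySem.Dict.keys_empty])
  rw [PySem.Dict.items_eq_map_keys _ hnd []]
  rw [PySem.Dict.keys_foldl_modify_key (PySem.List.enumerate ls 0)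
    (fun p : Int × String => p.2) []
    (fun _ (p : Int × String) (l : List Int) => l ++ [p.1]) PySem.Dict.empty]
  rw [PySem.List.map_snd_enumerate]
  rw [PySem.Dict.keys_empty, PySem.Set.update_nil_left]
  apply List.map_congr_left
  intro c hc
  congr 1
  rw [show (PySem.List.enumerate ls 0).foldl
      (fun (d : PySem.Dict String (List Int)) p => d.modify p.2 [] (· ++ [p.1]))
      PySem.Dict.empty
    = ((PySem.List.enumerate ls 0).map Prod.swap).foldl
      (fun (d : PySem.Dict String (List Int)) p => d.modify p.1 [] (· ++ [p.2]))
      PySem.Dict.empty from by rw [List.foldl_map]; rfl]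
  rw [PySem.Dict.getD_foldl_modify_append]
  simp [posOf, List.filter_map, List.map_map, Function.comp_def, PySem.Dict.getD_empty]

lemma rankBwt_alt_eq (bw : String) :
    rankBwt_alt bw =
      (((PySem.Set.ofList (bw.toList.map pvStr1)).map
          (fun c => (c, posOf 0 (bw.toList.map pvStr1) c))).foldl
        (fun (rs : List Int) kv => scat 0 kv.2 rs)
        (List.replicate (bw.toList.map pvStr1).length (0 : Int)),
       (PySem.Set.ofList (bw.toList.map pvStr1)).map
          (fun c => (c, ((posOf 0 (bw.toList.map pvStr1) c).length : Int)))) := by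
  simp only [rankBwt_alt]
  rw [positions_items]
  rw [PySem.List.foldl_prod_mk
    (f := fun (rs : List Int) (kv : String × List Int) =>
      (PySem.List.enumerate kv.2 0).foldl (fun rs ri => PySem.List.pySetD rs ri.2 ri.1) rs)
    (g := fun (tb : PySem.Dict String Int) (kv : String × List Int) =>
      tb.insert kv.1 (kv.2.length : Int))]
  rw [Prod.mk.injEq]
  constructor
  · rw [show PySem.List.pyRepeat [(0 : Int)] (PySem.Str.len bw)
        = List.replicate (bw.toList.map pvStr1).length (0 : Int) from by
      rw [PySem.List.pyRepeat_singleton, PySem.Str.len_eq]; simp]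
    rfl
  · rw [PySem.Dict.items_foldl_insert_fresh _ (fun kv : String × List Int => kv.1)
      (fun kv : String × List Int => ((kv.2.length : Int)))
      PySem.Dict.empty (fun a _ => PySem.Dict.contains_empty _)
      (by simp [List.map_map, Function.comp_def,
        PySem.Set.nodup_ofList (bw.toList.map pvStr1)])]
    simp [List.map_map, Function.comp_def]
    rfl

theorem final_eq (bw : String) : rankBwt bw = rankBwt_alt bw := by
  rw [rankBwt_eq, rankBwt_alt_eq, Prod.mk.injEq]
  constructor
  · apply List.ext_getElem
    · rw [ranksSpec_length, scatFold_length, List.length_replicate]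
    · intro k h1 h2
      have hk : k < (bw.toList.map pvStr1).length := by rwa [ranksSpec_length] at h1
      rw [ranksSpec_get _ PySem.Dict.empty k hk]
      rw [outer_get (bw.toList.map pvStr1) (PySem.Set.ofList (bw.toList.map pvStr1))
        (List.replicate (bw.toList.map pvStr1).length 0) (by simp) k hk]
      rw [if_pos ((PySem.Set.mem_ofList _ _).mpr (List.getElem_mem hk))]
      simp [PySem.Dict.getD_empty]
  · rw [PySem.Dict.items_counter]
    apply List.map_congr_left
    intro c hc
    rw [length_posOf]

-- ===== VERDICT (by name: the statement is the Claim_ definition above) =====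
theorem rankBwt_spec : Claim_equal_rankBwt := by
  intro bw _
  unfold Spec_rankBwt
  exact final_eq bw
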